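-- pv_equiv track=rewrite | github.com/isty2e/einf | tests/test_dim_solver.py | _classify_h_w_multiplication_target
-- ===== SOURCE A (Python) =====
-- def _classify_h_w_multiplication_target(target: int) -> str:
--     """Brute-force classify h*w=target over small non-negative domain."""
--     solutions: list[tuple[int, int]] = []
--     for h in range(0, 33):
--         for w in range(0, 33):
--             if h * w == target:
--                 solutions.append((h, w))
--                 if len(solutions) >= 2:
--                     return "ambiguous"
--     if len(solutions) == 1:
--         return "unique"
--     return "inconsistent"
-- ===== SOURCE B (Python) =====
-- def _classify_h_w_multiplication_target(target: int) -> str: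
--     """Divisor-counting classification of h*w=target over 0..32 x 0..32."""
--     if target == 0:
--         return "ambiguous"  # (0, w) for every w and (h, 0) for every h
--     if target < 0 or target > 1024:
--         return "inconsistent"
--     count = 0
--     for h in range(1, 33):
--         if target % h == 0 and target // h <= 32:
--             count += 1
--     if count == 0:
--         return "inconsistent"
--     if count == 1:
--         return "unique"
--     return "ambiguous"
-- ===== Notes on version B (the rewrite author's own statement) =====
-- stated objective: alternative
-- what changed: Replaced the nested 33x33 brute-force scan over all (h,w) pairs by a single 32-step divisor-counting loop, with arithmetic special cases for the zero, negative and out-of-range targets.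
import Mathlib
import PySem

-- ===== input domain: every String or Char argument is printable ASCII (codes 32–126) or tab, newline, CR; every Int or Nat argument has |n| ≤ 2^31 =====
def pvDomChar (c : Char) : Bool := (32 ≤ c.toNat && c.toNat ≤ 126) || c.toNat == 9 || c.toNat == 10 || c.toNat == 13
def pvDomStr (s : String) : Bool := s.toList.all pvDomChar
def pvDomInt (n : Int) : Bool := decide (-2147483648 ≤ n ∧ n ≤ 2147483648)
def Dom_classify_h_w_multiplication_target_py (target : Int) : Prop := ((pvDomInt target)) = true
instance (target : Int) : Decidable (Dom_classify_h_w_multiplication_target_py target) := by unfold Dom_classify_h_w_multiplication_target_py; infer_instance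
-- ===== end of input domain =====

-- B replaces A's nested brute-force pair scan by a single divisor-counting loop with
-- arithmetic special cases; exact equivalence is proved below.

-- ===== PORT A =====
-- inner 'for w in range(0,33)' loop: .inr = early 'return "ambiguous"', .inl = fall through with sols
def pvAInner (target h : Int) (ws : List Int) (sols : List (Int × Int)) :
    List (Int × Int) ⊕ String :=
  match ws with
  | [] => .inl sols
  | w :: rest =>
    if h * w == target then
      if 2 ≤ (sols ++ [(h, w)]).length then .inr "ambiguous"
      else pvAInner target h rest (sols ++ [(h, w)])
    else pvAInner target h rest sols

-- outer 'for h in range(0,33)' loop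
def pvAOuter (target : Int) (hs : List Int) (sols : List (Int × Int)) :
    List (Int × Int) ⊕ String :=
  match hs with
  | [] => .inl sols
  | h :: rest =>
    match pvAInner target h (PySem.List.pyRange 0 33 1) sols with
    | .inr s => .inr s
    | .inl sols' => pvAOuter target rest sols'

def classify_h_w_multiplication_target_py (target : Int) : String :=
  match pvAOuter target (PySem.List.pyRange 0 33 1) [] with
  | .inr s => s
  | .inl sols => if sols.length == 1 then "unique" else "inconsistent"

-- ===== PORT B =====
def pvBCount (target : Int) (hs : List Int) (count : Int) : Int :=
  match hs with
  | [] => count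
  | h :: rest =>
    if PySem.Int.mod target h == 0 && decide (PySem.Int.floordiv target h ≤ 32) then
      pvBCount target rest (count + 1)
    else pvBCount target rest count

def classify_h_w_multiplication_target_py_alt (target : Int) : String :=
  if target == 0 then "ambiguous"
  else if decide (target < 0) || decide (target > 1024) then "inconsistent"
  else
    let count := pvBCount target (PySem.List.pyRange 1 33 1) 0
    if count == 0 then "inconsistent"
    else if count == 1 then "unique"
    else "ambiguous"

-- ===== PRECONDITION & SPEC =====
def Spec_classify_h_w_multiplication_target_py (target : Int) (out : String) : Prop := out = classify_h_w_multiplication_target_py_alt target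
instance (target : Int) (out : String) : Decidable (Spec_classify_h_w_multiplication_target_py target out) := by unfold Spec_classify_h_w_multiplication_target_py; infer_instance

-- ===== CLAIM (what is proved, stated in full; the proofs are below) =====
def Claim_equal_classify_h_w_multiplication_target_py : Prop := ∀ (target : Int), Dom_classify_h_w_multiplication_target_py target → Spec_classify_h_w_multiplication_target_py target (classify_h_w_multiplication_target_py target)

-- ===== LEMMAS AND PROOFS =====

-- number of inner-loop solutions for a fixed h
def pvSols (t h : Int) : Nat := (PySem.List.pyRange 0 33 1).countP (fun w => h * w == t)
-- total number of solutions A collects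
def pvN (t : Int) : Nat := ((PySem.List.pyRange 0 33 1).map (fun h => pvSols t h)).sum
-- B's divisor predicate
def pvBPred (t h : Int) : Bool := PySem.Int.mod t h == 0 && decide (PySem.Int.floordiv t h ≤ 32)

theorem pv_range_nodup : (PySem.List.pyRange 0 33 1).Nodup := by decide

theorem pv_range_split : PySem.List.pyRange 0 33 1 = 0 :: PySem.List.pyRange 1 33 1 := by decide

theorem pv_sum_ite (l : List Int) (p : Int → Bool) :
    (l.map fun a => if p a then (1 : Nat) else 0).sum = l.countP p := by
  induction l with
  | nil => rfl
  | cons a t ih =>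
    by_cases hp : p a
    · simp [hp, ih]; omega
    · simp [hp, ih]

-- A's inner loop: early-returns "ambiguous" iff the running total reaches 2, else appends all hits
theorem pvAInner_char (t h : Int) (ws : List Int) (sols : List (Int × Int))
    (hlen : sols.length ≤ 1) :
    pvAInner t h ws sols =
      if 2 ≤ sols.length + ws.countP (fun w => h * w == t) then .inr "ambiguous"
      else .inl (sols ++ (ws.filter (fun w => h * w == t)).map (fun w => (h, w))) := by
  induction ws generalizing sols with
  | nil => simp [pvAInner]; omega
  | cons w rest ih =>
    simp only [pvAInner, List.countP_cons, List.filter_cons]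
    by_cases hw : (h * w == t) = true
    · simp only [hw, if_true, List.length_append, List.length_cons, List.length_nil]
      by_cases h2 : 2 ≤ sols.length + 1
      · rw [if_pos (by omega), if_pos (by omega)]
      · rw [if_neg (by omega),
          ih _ (by simp only [List.length_append, List.length_cons, List.length_nil]; omega)]
        simp only [List.length_append, List.length_cons, List.length_nil]
        by_cases h3 : 2 ≤ sols.length + 1 + rest.countP (fun w => h * w == t)
        · rw [if_pos (by omega), if_pos (by omega)]
        · rw [if_neg (by omega), if_neg (by omega)]
          simp
    · rw [if_neg hw, ih _ hlen]
      simp only [Bool.not_eq_true] at hw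
      simp [hw]

-- A's outer loop, characterized by the total solution count pvN
theorem pvAOuter_char (t : Int) (hs : List Int) (sols : List (Int × Int))
    (hlen : sols.length ≤ 1) :
    pvAOuter t hs sols =
      if 2 ≤ sols.length + ((hs.map fun h => pvSols t h).sum) then .inr "ambiguous"
      else .inl (sols ++ hs.flatMap fun h =>
        ((PySem.List.pyRange 0 33 1).filter (fun w => h * w == t)).map (fun w => (h, w))) := by
  induction hs generalizing sols with
  | nil => simp [pvAOuter]; omega
  | cons h rest ih =>
    simp only [pvAOuter, List.map_cons, List.sum_cons, List.flatMap_cons]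
    rw [pvAInner_char t h _ sols hlen]
    by_cases h2 : 2 ≤ sols.length + pvSols t h
    · rw [if_pos (by unfold pvSols at h2; omega), if_pos (by omega)]
    · rw [if_neg (by unfold pvSols at h2; omega)]
      dsimp only
      have hl : (sols ++ ((PySem.List.pyRange 0 33 1).filter (fun w => h * w == t)).map
          (fun w => (h, w))).length = sols.length + pvSols t h := by
        simp [pvSols, List.countP_eq_length_filter]
      rw [ih _ (by omega)]
      rw [hl]
      by_cases h3 : 2 ≤ sols.length + pvSols t h + (rest.map fun h => pvSols t h).sum
      · rw [if_pos (by omega), if_pos (by omega)]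
      · rw [if_neg (by omega), if_neg (by omega)]
        simp

-- A computed from the count pvN
theorem pvA_char (t : Int) :
    classify_h_w_multiplication_target_py t =
      if 2 ≤ pvN t then "ambiguous"
      else if pvN t == 1 then "unique" else "inconsistent" := by
  unfold classify_h_w_multiplication_target_py
  rw [pvAOuter_char t _ [] (by simp)]
  by_cases h2 : 2 ≤ pvN t
  · rw [if_pos (by unfold pvN at h2; simp only [List.length_nil]; omega), if_pos h2]
  · rw [if_neg (by unfold pvN at h2; simp only [List.length_nil]; omega), if_neg h2]
    dsimp only
    have : (([] : List (Int × Int)) ++ (PySem.List.pyRange 0 33 1).flatMap fun h =>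
        ((PySem.List.pyRange 0 33 1).filter (fun w => h * w == t)).map (fun w => (h, w))).length
        = pvN t := by
      simp [pvN, pvSols, List.length_flatMap, List.countP_eq_length_filter]
    rw [this]

-- B's loop is a countP with an accumulator
theorem pvBCount_char (t : Int) (l : List Int) (c : Int) :
    pvBCount t l c = c + (l.countP (pvBPred t) : Int) := by
  induction l generalizing c with
  | nil => simp [pvBCount]
  | cons h rest ih =>
    simp only [pvBCount, List.countP_cons]
    by_cases hp : pvBPred t h
    · rw [if_pos (by simpa [pvBPred] using hp), ih]
      simp [hp]; omega
    · rw [if_neg (by simpa [pvBPred] using hp), ih]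
      simp [hp]

-- for positive targets, the inner count for h ≥ 1 is exactly B's divisor indicator
theorem pv_indicator (t h : Int) (ht : 1 ≤ t) (hh : 1 ≤ h) :
    pvSols t h = if pvBPred t h then 1 else 0 := by
  have hpos : (0 : Int) < h := by omega
  have hmod : PySem.Int.mod t h = t % h := PySem.Int.mod_eq_emod_of_pos hpos
  have hdiv : PySem.Int.floordiv t h = t / h := PySem.Int.floordiv_eq_ediv_of_pos hpos
  by_cases hd : h ∣ t
  · have hmodz : t % h = 0 := Int.emod_eq_zero_of_dvd hd
    have hiff : ∀ w : Int, (h * w = t) ↔ (w = t / h) := by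
      intro w
      constructor
      · intro e; rw [← e, Int.mul_ediv_cancel_left w hpos.ne']
      · intro e; rw [e, Int.mul_ediv_cancel' hd]
    have hcong : pvSols t h = (PySem.List.pyRange 0 33 1).count (t / h) := by
      unfold pvSols
      rw [List.count]
      exact List.countP_congr fun w _ => by
        rw [Bool.eq_iff_iff]; simp [hiff w]
    have hdnn : 0 ≤ t / h := Int.ediv_nonneg (by omega) (by omega)
    have hbp : pvBPred t h = decide (t / h ≤ 32) := by
      simp [pvBPred, hmod, hdiv, hmodz]
    by_cases h32 : t / h ≤ 32
    · rw [hcong, List.count_eq_one_of_mem pv_range_nodup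
        (by rw [PySem.List.mem_pyRange_one]; omega), hbp, if_pos (by simpa using h32)]
    · rw [hcong, List.count_eq_zero.mpr
        (by rw [PySem.List.mem_pyRange_one]; omega), hbp, if_neg (by simpa using h32)]
  · have hmodz : ¬ t % h = 0 := fun e => hd (Int.dvd_of_emod_eq_zero e)
    rw [if_neg (by simp [pvBPred, hmod, hmodz])]
    unfold pvSols
    rw [List.countP_eq_zero.mpr]
    intro w _
    simp only [beq_iff_eq]
    exact fun e => hd ⟨w, e.symm⟩

-- total count equals B's divisor count, for positive targets
theorem pvN_eq (t : Int) (ht : 1 ≤ t) :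
    pvN t = (PySem.List.pyRange 1 33 1).countP (pvBPred t) := by
  unfold pvN
  rw [pv_range_split, List.map_cons, List.sum_cons]
  have h0 : pvSols t 0 = 0 := by
    unfold pvSols
    rw [List.countP_eq_zero.mpr]
    intro w _
    simp only [beq_iff_eq, zero_mul]
    omega
  rw [h0, Nat.zero_add]
  rw [List.map_congr_left (fun h hm => pv_indicator t h ht
    (by rw [PySem.List.mem_pyRange_one] at hm; omega))]
  exact pv_sum_ite _ _

-- If no product h*w with h, w in range can equal target, A's loops are no-ops.
theorem pvAInner_noop (target h : Int) (ws : List Int) (sols : List (Int × Int))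
    (hne : ∀ w ∈ ws, h * w ≠ target) :
    pvAInner target h ws sols = .inl sols := by
  induction ws with
  | nil => rfl
  | cons w rest ih =>
    simp only [pvAInner]
    rw [if_neg (by simpa using hne w (by simp))]
    exact ih fun x hx => hne x (by simp [hx])

theorem pvAOuter_noop (target : Int) (hs : List Int) (sols : List (Int × Int))
    (hne : ∀ h ∈ hs, ∀ w ∈ PySem.List.pyRange 0 33 1, h * w ≠ target) :
    pvAOuter target hs sols = .inl sols := by
  induction hs with
  | nil => rfl
  | cons h rest ih =>
    simp only [pvAOuter]
    rw [pvAInner_noop target h _ sols (hne h (by simp))]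
    exact ih fun x hx => hne x (by simp [hx])

-- outside [0, 1024] no product of two range elements hits target
theorem pv_big_no_sol (target : Int) (hbig : target < 0 ∨ target > 1024) :
    ∀ h ∈ PySem.List.pyRange 0 33 1, ∀ w ∈ PySem.List.pyRange 0 33 1, h * w ≠ target := by
  intro h hh w hw
  have hh' : 0 ≤ h ∧ h ≤ 32 := by rw [PySem.List.mem_pyRange_one] at hh; omega
  have hw' : 0 ≤ w ∧ w ≤ 32 := by rw [PySem.List.mem_pyRange_one] at hw; omega
  have h1 : 0 ≤ h * w := mul_nonneg hh'.1 hw'.1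
  have h2 : h * w ≤ 1024 := by nlinarith [hh'.1, hh'.2, hw'.1, hw'.2]
  omega

-- ===== VERDICT (by name: the statement is the Claim_ definition above) =====
theorem classify_h_w_multiplication_target_py_spec : Claim_equal_classify_h_w_multiplication_target_py := by
  intro target _
  unfold Spec_classify_h_w_multiplication_target_py
  by_cases h0 : target = 0
  · subst h0; decide
  by_cases hbig : target < 0 ∨ target > 1024
  · unfold classify_h_w_multiplication_target_py
    rw [pvAOuter_noop target _ [] (pv_big_no_sol target hbig)]
    unfold classify_h_w_multiplication_target_py_alt
    rw [if_neg (by simpa using h0)]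
    rw [if_pos (by rcases hbig with h | h <;> simp [h])]
    simp
  · have ht : 1 ≤ target ∧ target ≤ 1024 := by omega
    have hb : classify_h_w_multiplication_target_py_alt target =
        (if pvN target = 0 then "inconsistent"
         else if pvN target = 1 then "unique" else "ambiguous") := by
      unfold classify_h_w_multiplication_target_py_alt
      rw [if_neg (by simp only [beq_iff_eq]; exact h0), if_neg (by simp; omega)]
      rw [pvBCount_char, ← pvN_eq target ht.1, Int.zero_add]
      by_cases hn0 : pvN target = 0
      · rw [if_pos (by simp [hn0]), if_pos hn0]
      · rw [if_neg (by simp only [beq_iff_eq]; exact_mod_cast hn0), if_neg hn0]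
        by_cases hn1 : pvN target = 1
        · rw [if_pos (by simp [hn1]), if_pos hn1]
        · rw [if_neg (by simp only [beq_iff_eq]; exact_mod_cast hn1), if_neg hn1]
    rw [pvA_char, hb]
    by_cases h2 : 2 ≤ pvN target
    · rw [if_pos h2, if_neg (by omega), if_neg (by omega)]
    · rw [if_neg h2]
      by_cases hn1 : pvN target = 1
      · rw [if_pos (by simp [hn1]), if_neg (by omega), if_pos hn1]
      · rw [if_neg (by simp only [beq_iff_eq]; exact hn1), if_pos (by omega)]
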